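-- pv_equiv track=rewrite | github.com/KevinArmbruster/battlesnake | snake_strategy_behaviors.py | buildPartnerDict
-- ===== SOURCE A (Python) =====
-- from collections import deque, defaultdict
-- from itertools import groupby
--
-- def buildPartnerDict(snakes):
--     # uses snake name slice to group teams
--     partners = defaultdict(list)
--     sorted_snakes = sorted(snakes, key=lambda x: x['name'][:-2])
--
--     grouped_data = groupby(sorted_snakes, key=lambda x: x['name'][:-2])
--
--     for key, group in grouped_data:
--         ids = set(item['id'] for item in group)
--
--         for id_1 in ids:
--             for id_2 in ids:
--                 if id_1 != id_2:
--                     partners[id_1].append(id_2)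
--
--     return partners
-- ===== SOURCE B (Python) =====
-- from collections import defaultdict
--
--
-- def buildPartnerDict(snakes):
--     # Brute-force rescans instead of grouping: no groupby, no per-group
--     # container, no cross-pair double loop.  Walk the snakes in sorted-prefix
--     # order; for each not-yet-handled (prefix, id) occurrence, scan the whole
--     # input once, collecting that snake's partner ids directly.
--     partners = defaultdict(list)
--     seen = set()
--     for s in sorted(snakes, key=lambda x: x['name'][:-2]):
--         k = s['name'][:-2]
--         if (k, s['id']) in seen:
--             continue
--         seen.add((k, s['id']))
--         out = []
--         for t in snakes:
--             if t['name'][:-2] == k and t['id'] != s['id'] and t['id'] not in out: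
--                 out.append(t['id'])
--         if out:
--             partners[s['id']].extend(out)
--     return partners
-- ===== Notes on version B (the rewrite author's own statement) =====
-- stated objective: alternative
-- what changed: Drops itertools.groupby, the per-group id set and the per-group cross-pair double loop entirely: B walks the snakes once in sorted-prefix order with a seen-set of (prefix,id) pairs and, for each new pair, brute-force rescans the whole original input collecting that snake's partner ids directly into its list.
import Mathlib
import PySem

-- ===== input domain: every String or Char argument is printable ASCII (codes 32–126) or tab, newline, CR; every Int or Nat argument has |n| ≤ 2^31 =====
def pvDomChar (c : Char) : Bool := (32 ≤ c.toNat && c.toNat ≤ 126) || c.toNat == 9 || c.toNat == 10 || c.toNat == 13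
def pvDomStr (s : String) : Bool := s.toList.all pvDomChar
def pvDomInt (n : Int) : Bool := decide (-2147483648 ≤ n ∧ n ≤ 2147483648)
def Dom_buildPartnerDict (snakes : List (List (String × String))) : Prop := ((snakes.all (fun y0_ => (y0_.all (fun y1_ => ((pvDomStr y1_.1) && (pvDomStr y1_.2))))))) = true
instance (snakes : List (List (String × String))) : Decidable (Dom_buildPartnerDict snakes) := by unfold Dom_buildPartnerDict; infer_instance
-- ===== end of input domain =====

-- B drops groupby, the per-group id set and the cross-pair double loop: it walks the
-- snakes once in sorted-prefix order with a seen-set of (prefix, id) pairs and, for each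
-- new pair, brute-force rescans the whole input for that snake's partners (objective: alternative).

-- shared helpers: snake['name'] / snake['id'] as their total forms (exact under Pre_, which
-- requires both keys to be present), and the grouping key name[:-2]
def pvLook (s : List (String × String)) (k : String) : String :=
  ((PySem.Dict.ofList s).get? k).getD ""

def pvKey (s : List (String × String)) : String :=
  PySem.Str.slice (pvLook s "name") none (some (-2))

def pvId (s : List (String × String)) : String :=
  pvLook s "id"

-- ===== PORT A =====
-- itertools.groupby(l, key): consecutive runs of equal key, ported by hand (exact for a list argument)
def pyGroupby {α κ : Type} [BEq κ] (key : α → κ) : List α → List (κ × List α)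
  | [] => []
  | x :: xs =>
    (key x, x :: xs.takeWhile (fun y => key y == key x)) ::
      pyGroupby key (xs.dropWhile (fun y => key y == key x))
  termination_by l => l.length
  decreasing_by
    simp only [List.length_cons]
    exact Nat.lt_succ_of_le (List.length_dropWhile_le _ _)

def buildPartnerDict (snakes : List (List (String × String))) : List (String × List String) :=
  let sorted_snakes := PySem.List.sorted snakes pvKey
  let grouped_data := pyGroupby pvKey sorted_snakes
  let partners := grouped_data.foldl (fun partners kg =>
      let ids : PySem.Set String := PySem.Set.ofList (kg.2.map pvId)
      ids.foldl (fun p id1 =>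
        ids.foldl (fun p2 id2 =>
          if id1 ≠ id2 then p2.insert id1 (p2.getD id1 [] ++ [id2]) else p2) p) partners)
    PySem.Dict.empty
  partners.items

-- ===== PORT B =====
-- the inner rescan of Source B: 'for t in snakes: if key(t)==k and id(t)!=id and id(t) not in out: out.append(id(t))'
def pvOut (snakes : List (List (String × String))) (k id : String) : List String :=
  snakes.foldl (fun out t =>
    if pvKey t == k && pvId t != id && !(out.contains (pvId t)) then out ++ [pvId t]
    else out) []

def buildPartnerDict_alt (snakes : List (List (String × String))) : List (String × List String) :=
  let res := (PySem.List.sorted snakes pvKey).foldl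
    (fun (st : PySem.Set (String × String) × PySem.Dict String (List String)) s =>
      if PySem.Set.contains st.1 (pvKey s, pvId s) then st
      else
        let out := pvOut snakes (pvKey s) (pvId s)
        (PySem.Set.add st.1 (pvKey s, pvId s),
         if out ≠ [] then st.2.insert (pvId s) (st.2.getD (pvId s) [] ++ out) else st.2))
    (PySem.Set.empty, PySem.Dict.empty)
  res.2.items

-- ===== PRECONDITION & SPEC =====
-- Pre_ excludes (a) snakes missing a 'name' or 'id' key, on which A raises KeyError, and
-- (b) inputs where some name-prefix group has three or more distinct ids, on which A's
-- partner-list order is Python's nondeterministic set-iteration (hash) order — an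
-- accidental, unmatchable value.
def Pre_buildPartnerDict (snakes : List (List (String × String))) : Prop :=
  (∀ s ∈ snakes, ((PySem.Dict.ofList s).get? "name").isSome ∧ ((PySem.Dict.ofList s).get? "id").isSome) ∧
  (∀ s ∈ snakes,
    (PySem.List.dedup ((snakes.filter (fun t => pvKey t == pvKey s)).map pvId)).length ≤ 2)
instance (snakes : List (List (String × String))) : Decidable (Pre_buildPartnerDict snakes) := by
  unfold Pre_buildPartnerDict; infer_instance

def pvWitness_buildPartnerDict : (List (List (String × String))) :=
  [[("name", "alpha01"), ("id", "A")], [("name", "alpha02"), ("id", "B")],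
   [("name", "solo77"), ("id", "C")]]

def Spec_buildPartnerDict (snakes : List (List (String × String))) (out : List (String × List String)) : Prop := out = buildPartnerDict_alt snakes
instance (snakes : List (List (String × String))) (out : List (String × List String)) : Decidable (Spec_buildPartnerDict snakes out) := by unfold Spec_buildPartnerDict; infer_instance

-- ===== CLAIM (what is proved, stated in full; the proofs are below) =====
def Claim_equal_buildPartnerDict : Prop := ∀ (snakes : List (List (String × String))), Dom_buildPartnerDict snakes → Pre_buildPartnerDict snakes → Spec_buildPartnerDict snakes (buildPartnerDict snakes)

-- ===== LEMMAS AND PROOFS =====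

theorem pv_dropWhile_head {α : Type} (p : α → Bool) (xs : List α) (y : α) (ys : List α)
    (h : xs.dropWhile p = y :: ys) : p y = false := by
  induction xs with
  | nil => simp at h
  | cons a as ih =>
    rw [List.dropWhile_cons] at h
    by_cases hp : p a
    · rw [if_pos hp] at h; exact ih h
    · rw [if_neg hp] at h
      cases h
      simpa using hp

-- insertion keeps the filtered-by-one-key subsequence stable
theorem pv_insertBy_filter {α : Type} (key : α → String) (c : String) (x : α) (l : List α)
    (hl : l.Pairwise (fun a b => key a ≤ key b)) :
    (PySem.List.insertBy (fun a b => decide (key a < key b)) x l).filter (fun a => key a == c)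
      = l.filter (fun a => key a == c) ++ (if key x == c then [x] else []) := by
  induction l with
  | nil => simp [PySem.List.insertBy, List.filter_cons]
  | cons y ys ih =>
    rcases List.pairwise_cons.mp hl with ⟨hy, hys⟩
    by_cases hxy : key x < key y
    · have hlt : ∀ a ∈ y :: ys, key x < key a := by
        intro a ha
        rcases List.mem_cons.mp ha with h | h
        · exact h ▸ hxy
        · exact lt_of_lt_of_le hxy (hy a h)
      have hstep : PySem.List.insertBy (fun a b => decide (key a < key b)) x (y :: ys)
          = x :: y :: ys := by
        simp [PySem.List.insertBy, hxy]
      rw [hstep]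
      by_cases hxc : key x = c
      · have hemp : (y :: ys).filter (fun a => key a == c) = [] := by
          refine List.filter_eq_nil_iff.mpr ?_
          intro a ha
          have h1 := hlt a ha
          simp only [beq_iff_eq]
          exact fun h => h1.ne' (h.trans hxc.symm)
        simp [hxc, hemp]
      · simp [hxc]
    · have hstep : PySem.List.insertBy (fun a b => decide (key a < key b)) x (y :: ys)
          = y :: PySem.List.insertBy (fun a b => decide (key a < key b)) x ys := by
        simp [PySem.List.insertBy, hxy]
      rw [hstep, List.filter_cons, List.filter_cons, ih hys]
      by_cases hyc : key y == c <;> simp [hyc]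

-- sorted is stable: the elements of one key class keep their original order
theorem pv_sorted_filter_key {α : Type} (key : α → String) (c : String) (xs : List α) :
    (PySem.List.sorted xs key).filter (fun a => key a == c)
      = xs.filter (fun a => key a == c) := by
  induction xs using List.reverseRecOn with
  | nil => simp [PySem.List.sorted_eq_foldl_insertBy]
  | append_singleton xs x ih =>
    have h1 : PySem.List.sorted (xs ++ [x]) key
        = PySem.List.insertBy (fun a b => decide (key a < key b)) x
            (PySem.List.sorted xs key) := by
      rw [PySem.List.sorted_eq_foldl_insertBy, PySem.List.sorted_eq_foldl_insertBy,
        List.foldl_append]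
      simp
    rw [h1, pv_insertBy_filter key c x _ (PySem.List.sorted_pairwise xs key), ih,
      List.filter_append]
    simp [List.filter_cons]

theorem pv_dedup_cons_dup {α : Type} [BEq α] [LawfulBEq α] (c : α) (w : List α) :
    PySem.List.dedup (c :: c :: w) = PySem.List.dedup (c :: w) := by
  simp only [PySem.List.dedup, PySem.Set.ofList_cons, PySem.Set.discard]
  simp [List.filter_filter]

theorem pv_dedup_cons_absorb {α : Type} [BEq α] [LawfulBEq α] (c : α) (m r : List α)
    (hm : ∀ a ∈ m, a = c) (hr : c ∉ r) :
    PySem.List.dedup (c :: (m ++ r)) = c :: PySem.List.dedup r := by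
  induction m with
  | nil =>
    simp only [List.nil_append, PySem.List.dedup, PySem.Set.ofList_cons, PySem.Set.discard]
    congr 1
    refine List.filter_eq_self.mpr ?_
    intro a ha
    have ha' : a ∈ r := (PySem.Set.mem_ofList _ _).mp ha
    simp only [Bool.not_eq_eq_eq_not, Bool.not_true, beq_eq_false_iff_ne, ne_eq]
    exact fun h => hr (h ▸ ha')
  | cons a m' ihm =>
    have hac : a = c := hm a (by simp)
    subst hac
    have : (a :: m') ++ r = a :: (m' ++ r) := rfl
    rw [this, pv_dedup_cons_dup]
    exact ihm (fun b hb => hm b (by simp [hb]))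

-- groupby on a key-sorted list: one group per distinct key, each group = that key's filter
theorem pv_groupby_char_aux {α : Type} (key : α → String) :
    ∀ (n : ℕ) (l : List α), l.length ≤ n → l.Pairwise (fun a b => key a ≤ key b) →
      pyGroupby key l
        = (PySem.List.dedup (l.map key)).map (fun k => (k, l.filter (fun a => key a == k))) := by
  intro n
  induction n with
  | zero =>
    intro l hlen _
    have : l = [] := List.eq_nil_of_length_eq_zero (Nat.le_zero.mp hlen)
    subst this
    simp [pyGroupby, PySem.List.dedup, PySem.Set.ofList]
  | succ n ih =>
    intro l hlen hl
    cases l with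
    | nil => simp [pyGroupby, PySem.List.dedup, PySem.Set.ofList]
    | cons x xs =>
      obtain ⟨t, htdef⟩ : ∃ t, xs.takeWhile (fun y => key y == key x) = t := ⟨_, rfl⟩
      obtain ⟨d, hddef⟩ : ∃ d, xs.dropWhile (fun y => key y == key x) = d := ⟨_, rfl⟩
      have hxs : t ++ d = xs := by
        rw [← htdef, ← hddef]; exact List.takeWhile_append_dropWhile
      have ht : ∀ y ∈ t, key y = key x := by
        intro y hy
        rw [← htdef] at hy
        have := List.mem_takeWhile_imp hy
        simpa using this
      have hdsub : d.Sublist xs := by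
        rw [← hddef]; exact List.dropWhile_sublist _
      have hpwd : d.Pairwise (fun a b => key a ≤ key b) :=
        (List.pairwise_cons.mp hl).2.sublist hdsub
      have hxle : ∀ y ∈ xs, key x ≤ key y := (List.pairwise_cons.mp hl).1
      have hd : ∀ y ∈ d, key x < key y := by
        rcases d with _ | ⟨y0, d'⟩
        · intro y hy; simp at hy
        · have h0 : (fun y => key y == key x) y0 = false :=
            pv_dropWhile_head _ xs y0 d' hddef
          have h0b : (key y0 == key x) = false := h0
          have h0' : key x ≠ key y0 := fun h => by simp [h] at h0b
          have hx0 : key x < key y0 :=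
            lt_of_le_of_ne (hxle y0 (hdsub.subset (by simp))) h0'
          intro y hy
          rcases List.mem_cons.mp hy with rfl | hy'
          · exact hx0
          · exact lt_of_lt_of_le hx0 ((List.pairwise_cons.mp hpwd).1 y hy')
      have hg : pyGroupby key (x :: xs) = (key x, x :: t) :: pyGroupby key d := by
        rw [pyGroupby, htdef, hddef]
      have hmap : (x :: xs).map key = key x :: (t.map key ++ d.map key) := by
        rw [← hxs]; simp
      have hded : PySem.List.dedup ((x :: xs).map key)
          = key x :: PySem.List.dedup (d.map key) := by
        rw [hmap]
        refine pv_dedup_cons_absorb (key x) (t.map key) (d.map key) ?_ ?_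
        · intro a ha
          rcases List.mem_map.mp ha with ⟨y, hy, rfl⟩
          exact ht y hy
        · intro hmem
          rcases List.mem_map.mp hmem with ⟨y, hy, hkey⟩
          exact (hd y hy).ne' hkey
      have hfx : (x :: xs).filter (fun a => key a == key x) = x :: t := by
        rw [List.filter_cons, if_pos (by simp), ← hxs, List.filter_append]
        have h1 : t.filter (fun a => key a == key x) = t :=
          List.filter_eq_self.mpr (fun a ha => by simp [ht a ha])
        have h2 : d.filter (fun a => key a == key x) = [] :=
          List.filter_eq_nil_iff.mpr (fun a ha => by simp [(hd a ha).ne'])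
        rw [h1, h2, List.append_nil]
      have hdlen : d.length ≤ n := by
        have h1 := hdsub.length_le
        simp only [List.length_cons] at hlen
        omega
      have hrec : pyGroupby key d
          = (PySem.List.dedup (d.map key)).map
              (fun k => (k, d.filter (fun a => key a == k))) :=
        ih d hdlen hpwd
      have hfk : ∀ k ∈ PySem.List.dedup (d.map key),
          (x :: xs).filter (fun a => key a == k) = d.filter (fun a => key a == k) := by
        intro k hk
        have hk' : k ∈ d.map key := (PySem.List.mem_dedup _ _).mp hk
        rcases List.mem_map.mp hk' with ⟨y, hy, rfl⟩
        have hklt : key x < key y := hd y hy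
        rw [List.filter_cons, if_neg (by simp [hklt.ne]), ← hxs, List.filter_append]
        have h1 : t.filter (fun a => key a == key y) = [] := by
          refine List.filter_eq_nil_iff.mpr ?_
          intro a ha
          simp only [beq_iff_eq, ht a ha]
          exact hklt.ne
        rw [h1, List.nil_append]
      rw [hg, hded, List.map_cons]
      congr 1
      · rw [hfx]
      · rw [hrec]
        apply List.map_congr_left
        intro k hk
        rw [hfk k hk]

theorem pv_groupby_char {α : Type} (key : α → String) (l : List α)
    (hl : l.Pairwise (fun a b => key a ≤ key b)) :
    pyGroupby key l
      = (PySem.List.dedup (l.map key)).map (fun k => (k, l.filter (fun a => key a == k))) :=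
  pv_groupby_char_aux key l.length l le_rfl hl

-- A's inner double loop collapses to one insert per id
theorem pv_inner_acc (ids : List String) (id1 : String) (p : PySem.Dict String (List String))
    (l : List String) :
    ids.foldl (fun p2 id2 =>
        if id1 ≠ id2 then p2.insert id1 (p2.getD id1 [] ++ [id2]) else p2)
      (p.insert id1 (p.getD id1 [] ++ l))
      = p.insert id1 (p.getD id1 [] ++ (l ++ ids.filter (fun x => decide (id1 ≠ x)))) := by
  induction ids generalizing l with
  | nil => simp
  | cons y ys ih =>
    rw [List.foldl_cons]
    by_cases h : id1 = y
    · rw [if_neg (by simp [h])]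
      rw [ih l]
      simp [h]
    · rw [if_pos h]
      rw [PySem.Dict.getD_insert_self, PySem.Dict.insert_insert_self]
      have h2 : p.getD id1 [] ++ l ++ [y] = p.getD id1 [] ++ (l ++ [y]) := by
        simp [List.append_assoc]
      rw [h2, ih (l ++ [y])]
      simp [h, List.append_assoc]

theorem pv_inner_all_eq (ids : List String) (id1 : String) (p : PySem.Dict String (List String))
    (h : ∀ x ∈ ids, x = id1) :
    ids.foldl (fun p2 id2 =>
        if id1 ≠ id2 then p2.insert id1 (p2.getD id1 [] ++ [id2]) else p2) p = p := by
  induction ids generalizing p with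
  | nil => simp
  | cons y ys ih =>
    rw [List.foldl_cons, if_neg (by simp [(h y (by simp)).symm])]
    exact ih p (fun x hx => h x (List.mem_cons_of_mem _ hx))

theorem pv_inner_some_ne (ids : List String) (id1 : String) (p : PySem.Dict String (List String))
    (h : ¬ ∀ x ∈ ids, x = id1) :
    ids.foldl (fun p2 id2 =>
        if id1 ≠ id2 then p2.insert id1 (p2.getD id1 [] ++ [id2]) else p2) p
      = p.insert id1 (p.getD id1 [] ++ ids.filter (fun x => decide (id1 ≠ x))) := by
  induction ids generalizing p with
  | nil => exact absurd (by simp) h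
  | cons y ys ih =>
    rw [List.foldl_cons]
    by_cases hy : id1 = y
    · rw [if_neg (by simp [hy])]
      have h' : ¬ ∀ x ∈ ys, x = id1 := by
        intro hall
        apply h
        intro x hx
        rcases List.mem_cons.mp hx with rfl | h1
        · exact hy.symm
        · exact hall x h1
      rw [ih p h', List.filter_cons, if_neg (by simp [hy])]
    · rw [if_pos hy, pv_inner_acc ys id1 p [y], List.filter_cons, if_pos (by simpa using hy)]
      simp

-- A's per-group double loop = one insert per id (nonempty-filter form), for a nodup id list
theorem pv_group_step (ids : List String) (hnd : ids.Nodup)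
    (partners : PySem.Dict String (List String)) :
    ids.foldl (fun p id1 =>
        ids.foldl (fun p2 id2 =>
          if id1 ≠ id2 then p2.insert id1 (p2.getD id1 [] ++ [id2]) else p2) p) partners
      = (if 1 < ids.length then
          ids.foldl (fun p id1 =>
            p.insert id1 (p.getD id1 [] ++ ids.filter (fun id2 => id2 ≠ id1))) partners
        else partners) := by
  by_cases hlen : 1 < ids.length
  · rw [if_pos hlen]
    apply PySem.List.foldl_congr_mem
    intro acc id1 hid1
    have hne : ¬ ∀ x ∈ ids, x = id1 := by
      rcases ids with _ | ⟨a, _ | ⟨b, rest⟩⟩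
      · simp at hlen
      · simp at hlen
      · have hab : a ≠ b := by
          have := (List.nodup_cons.mp hnd).1
          simp at this
          exact fun h => this.1 h
        intro hall
        have ha := hall a (by simp)
        have hb := hall b (by simp)
        exact hab (ha.trans hb.symm)
    rw [pv_inner_some_ne ids id1 acc hne]
    congr 2
    apply List.filter_congr
    intro a _
    simp [ne_comm]
  · rw [if_neg hlen]
    rcases ids with _ | ⟨a, _ | ⟨b, rest⟩⟩
    · simp
    · rw [List.foldl_cons, List.foldl_nil]
      exact pv_inner_all_eq [a] a partners (by simp)
    · exfalso; simp at hlen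

-- ===== B-side lemmas =====

-- map commutes with a filter whose test factors through the mapped function
theorem pv_map_filter {α β : Type} (f : α → β) (p : β → Bool) (l : List α) :
    (l.filter (fun a => p (f a))).map f = (l.map f).filter p := by
  induction l with
  | nil => simp
  | cons a t ih =>
    by_cases h : p (f a) <;> simp [h, ih]

-- dedup (first occurrences) commutes with filter
theorem pv_dedup_filter {α : Type} [BEq α] [LawfulBEq α] (p : α → Bool) (l : List α) :
    PySem.List.dedup (l.filter p) = (PySem.List.dedup l).filter p := by
  induction l with
  | nil => simp [PySem.List.dedup, PySem.Set.ofList]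
  | cons a t ih =>
    have hc : ∀ (w : List α), PySem.List.dedup (a :: w)
        = a :: (PySem.List.dedup w).filter (fun y => !(y == a)) := by
      intro w
      simpa [PySem.Set.discard] using PySem.Set.ofList_cons a w
    by_cases h : p a
    · rw [List.filter_cons, if_pos h, hc, hc, ih, List.filter_cons, if_pos h,
        List.filter_filter, List.filter_filter]
      congr 1
      apply List.filter_congr
      intro y _
      by_cases hy : y == a <;> simp [hy]
    · rw [List.filter_cons, if_neg h, ih, hc, List.filter_cons, if_neg h,
        List.filter_filter]
      apply List.filter_congr
      intro y _
      by_cases hy : (y : α) = a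
      · subst hy; simp [h]
      · simp [hy]

-- dedup commutes with pairing against a fixed first component
theorem pv_dedup_map_mk {β : Type} [BEq β] [LawfulBEq β] (c : String) (m : List β) :
    PySem.List.dedup (m.map (fun i => (c, i)))
      = (PySem.List.dedup m).map (fun i => (c, i)) := by
  induction m with
  | nil => simp [PySem.List.dedup, PySem.Set.ofList]
  | cons a t ih =>
    have hc : ∀ {γ : Type} [BEq γ] [LawfulBEq γ] (x : γ) (w : List γ), PySem.List.dedup (x :: w)
        = x :: (PySem.List.dedup w).filter (fun y => !(y == x)) := by
      intro γ _ _ x w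
      simpa [PySem.Set.discard] using PySem.Set.ofList_cons x w
    rw [List.map_cons, hc, hc, ih, ← pv_map_filter (fun i => (c, i)) (fun y => !(y == (c, a)))]
    congr 2
    apply List.filter_congr
    intro y _
    simp

-- dedup distributes over an append whose right part is disjoint from the left part
theorem pv_dedup_append_disjoint {α : Type} [BEq α] [LawfulBEq α] (A B : List α)
    (h : ∀ b ∈ B, b ∉ A) :
    PySem.List.dedup (A ++ B) = PySem.List.dedup A ++ PySem.List.dedup B := by
  induction A with
  | nil => simp [PySem.List.dedup, PySem.Set.ofList]
  | cons a t ih =>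
    have hc : ∀ (w : List α), PySem.List.dedup (a :: w)
        = a :: (PySem.List.dedup w).filter (fun y => !(y == a)) := by
      intro w
      simpa [PySem.Set.discard] using PySem.Set.ofList_cons a w
    have hB : ∀ b ∈ B, b ∉ t := fun b hb hbt => h b hb (List.mem_cons_of_mem _ hbt)
    rw [List.cons_append, hc, hc, ih hB, List.filter_append]
    have hBf : (PySem.List.dedup B).filter (fun y => !(y == a)) = PySem.List.dedup B := by
      refine List.filter_eq_self.mpr ?_
      intro b hb
      have hbB : b ∈ B := (PySem.List.mem_dedup _ _).mp hb
      have : b ≠ a := fun hba => h b hbB (hba ▸ List.mem_cons_self ..)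
      simp [this]
    rw [hBf, List.cons_append]

-- the deduped (key, id) pairs of a key-sorted list: one block of ids per distinct key
theorem pv_dedup_pairs_aux {α β : Type} [BEq β] [LawfulBEq β] (key : α → String) (f : α → β) :
    ∀ (n : ℕ) (l : List α), l.length ≤ n → l.Pairwise (fun a b => key a ≤ key b) →
      PySem.List.dedup (l.map (fun a => (key a, f a)))
        = (PySem.List.dedup (l.map key)).flatMap
            (fun k => (PySem.List.dedup ((l.filter (fun a => key a == k)).map f)).map
              (fun i => (k, i))) := by
  intro n
  induction n with
  | zero =>
    intro l hlen _
    have : l = [] := List.eq_nil_of_length_eq_zero (Nat.le_zero.mp hlen)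
    subst this
    simp [PySem.List.dedup, PySem.Set.ofList]
  | succ n ih =>
    intro l hlen hl
    cases l with
    | nil => simp [PySem.List.dedup, PySem.Set.ofList]
    | cons x xs =>
      obtain ⟨t, htdef⟩ : ∃ t, xs.takeWhile (fun y => key y == key x) = t := ⟨_, rfl⟩
      obtain ⟨d, hddef⟩ : ∃ d, xs.dropWhile (fun y => key y == key x) = d := ⟨_, rfl⟩
      have hxs : t ++ d = xs := by
        rw [← htdef, ← hddef]; exact List.takeWhile_append_dropWhile
      have ht : ∀ y ∈ t, key y = key x := by
        intro y hy
        rw [← htdef] at hy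
        have := List.mem_takeWhile_imp hy
        simpa using this
      have hdsub : d.Sublist xs := by
        rw [← hddef]; exact List.dropWhile_sublist _
      have hpwd : d.Pairwise (fun a b => key a ≤ key b) :=
        (List.pairwise_cons.mp hl).2.sublist hdsub
      have hxle : ∀ y ∈ xs, key x ≤ key y := (List.pairwise_cons.mp hl).1
      have hd : ∀ y ∈ d, key x < key y := by
        rcases d with _ | ⟨y0, d'⟩
        · intro y hy; simp at hy
        · have h0 : (fun y => key y == key x) y0 = false :=
            pv_dropWhile_head _ xs y0 d' hddef
          have h0b : (key y0 == key x) = false := h0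
          have h0' : key x ≠ key y0 := fun h => by simp [h] at h0b
          have hx0 : key x < key y0 :=
            lt_of_le_of_ne (hxle y0 (hdsub.subset (by simp))) h0'
          intro y hy
          rcases List.mem_cons.mp hy with rfl | hy'
          · exact hx0
          · exact lt_of_lt_of_le hx0 ((List.pairwise_cons.mp hpwd).1 y hy')
      have hded : PySem.List.dedup ((x :: xs).map key)
          = key x :: PySem.List.dedup (d.map key) := by
        have hmap : (x :: xs).map key = key x :: (t.map key ++ d.map key) := by
          rw [← hxs]; simp
        rw [hmap]
        refine pv_dedup_cons_absorb (key x) (t.map key) (d.map key) ?_ ?_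
        · intro a ha
          rcases List.mem_map.mp ha with ⟨y, hy, rfl⟩
          exact ht y hy
        · intro hmem
          rcases List.mem_map.mp hmem with ⟨y, hy, hkey⟩
          exact (hd y hy).ne' hkey
      have hfx : (x :: xs).filter (fun a => key a == key x) = x :: t := by
        rw [List.filter_cons, if_pos (by simp), ← hxs, List.filter_append]
        have h1 : t.filter (fun a => key a == key x) = t :=
          List.filter_eq_self.mpr (fun a ha => by simp [ht a ha])
        have h2 : d.filter (fun a => key a == key x) = [] :=
          List.filter_eq_nil_iff.mpr (fun a ha => by simp [(hd a ha).ne'])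
        rw [h1, h2, List.append_nil]
      have hfk : ∀ k ∈ PySem.List.dedup (d.map key),
          (x :: xs).filter (fun a => key a == k) = d.filter (fun a => key a == k) := by
        intro k hk
        have hk' : k ∈ d.map key := (PySem.List.mem_dedup _ _).mp hk
        rcases List.mem_map.mp hk' with ⟨y, hy, rfl⟩
        have hklt : key x < key y := hd y hy
        rw [List.filter_cons, if_neg (by simp [hklt.ne]), ← hxs, List.filter_append]
        have h1 : t.filter (fun a => key a == key y) = [] := by
          refine List.filter_eq_nil_iff.mpr ?_
          intro a ha
          simp only [beq_iff_eq, ht a ha]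
          exact hklt.ne
        rw [h1, List.nil_append]
      -- split the pair list into the first key block and the rest
      have hsplit : (x :: xs).map (fun a => (key a, f a))
          = ((x :: t).map (fun a => (key a, f a))) ++ d.map (fun a => (key a, f a)) := by
        rw [← hxs]; simp
      have hblock : (x :: t).map (fun a => (key a, f a))
          = ((x :: t).map f).map (fun i => (key x, i)) := by
        rw [List.map_map]
        apply List.map_congr_left
        intro a ha
        rcases List.mem_cons.mp ha with rfl | ha'
        · rfl
        · simp [Function.comp, ht a ha']
      have hdisj : ∀ q ∈ d.map (fun a => (key a, f a)),
          q ∉ (x :: t).map (fun a => (key a, f a)) := by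
        intro q hq hq'
        rcases List.mem_map.mp hq with ⟨y, hy, rfl⟩
        rcases List.mem_map.mp hq' with ⟨z, hz, hzq⟩
        have hz1 : key z = key x := by
          rcases List.mem_cons.mp hz with rfl | hz' 
          · rfl
          · exact ht z hz'
        have : key z = key y := congrArg Prod.fst hzq
        exact (hd y hy).ne' (by rw [← this, hz1])
      have hdlen : d.length ≤ n := by
        have h1 := hdsub.length_le
        simp only [List.length_cons] at hlen
        omega
      rw [hsplit, pv_dedup_append_disjoint _ _ hdisj, hblock, pv_dedup_map_mk,
        ih d hdlen hpwd, hded, List.flatMap_cons, hfx]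
      congr 1
      apply List.flatMap_congr
      intro k hk
      rw [hfk k hk]

-- the seen-set walk visits exactly the not-yet-seen pairs, in order
def pvPrune : PySem.Set (String × String) → List (String × String) → List (String × String)
  | _, [] => []
  | S, q :: l => if PySem.Set.contains S q then pvPrune S l else q :: pvPrune (PySem.Set.add S q) l

theorem pv_update_prune (l : List (String × String)) :
    ∀ (S : PySem.Set (String × String)), PySem.Set.update S l = S ++ pvPrune S l := by
  induction l with
  | nil => intro S; simp [PySem.Set.update, pvPrune]
  | cons q t ih =>
    intro S
    by_cases h : PySem.Set.contains S q
    · have hadd : PySem.Set.add S q = S := by rw [PySem.Set.add, if_pos h]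
      simp only [PySem.Set.update, List.foldl_cons, hadd, pvPrune, if_pos h]
      exact ih S
    · have hadd : PySem.Set.add S q = S ++ [q] := by rw [PySem.Set.add, if_neg h]
      simp only [PySem.Set.update, List.foldl_cons, hadd, pvPrune, if_neg h]
      have := ih (S ++ [q])
      simp only [PySem.Set.update] at this
      rw [this, List.append_assoc]
      rfl

theorem pv_prune_empty (l : List (String × String)) :
    pvPrune PySem.Set.empty l = PySem.List.dedup l := by
  have h := pv_update_prune l PySem.Set.empty
  have h2 : PySem.Set.update PySem.Set.empty l = PySem.Set.ofList l := rfl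
  rw [h2] at h
  rw [PySem.List.dedup_eq_ofList, h]
  rfl

-- the per-pair dict step of B
def pvG (snakes : List (List (String × String))) (d : PySem.Dict String (List String))
    (q : String × String) : PySem.Dict String (List String) :=
  let out := pvOut snakes q.1 q.2
  if out ≠ [] then d.insert q.2 (d.getD q.2 [] ++ out) else d

-- B's fold factors: seen accumulates every pair; the dict folds over the pruned pair list
theorem pv_bfold (snakes : List (List (String × String))) (l : List (List (String × String))) :
    ∀ (S : PySem.Set (String × String)) (d : PySem.Dict String (List String)),
    l.foldl
      (fun (st : PySem.Set (String × String) × PySem.Dict String (List String)) s =>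
        if PySem.Set.contains st.1 (pvKey s, pvId s) then st
        else
          let out := pvOut snakes (pvKey s) (pvId s)
          (PySem.Set.add st.1 (pvKey s, pvId s),
           if out ≠ [] then st.2.insert (pvId s) (st.2.getD (pvId s) [] ++ out) else st.2))
      (S, d)
    = (PySem.Set.update S (l.map (fun s => (pvKey s, pvId s))),
       (pvPrune S (l.map (fun s => (pvKey s, pvId s)))).foldl (pvG snakes) d) := by
  induction l with
  | nil => intro S d; simp [PySem.Set.update, pvPrune]
  | cons s t ih =>
    intro S d
    rw [List.foldl_cons]
    by_cases h : PySem.Set.contains S (pvKey s, pvId s)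
    · have hadd : PySem.Set.add S (pvKey s, pvId s) = S := by rw [PySem.Set.add, if_pos h]
      simp only [if_pos h, List.map_cons, pvPrune, PySem.Set.update, List.foldl_cons, hadd]
      exact ih S d
    · simp only [if_neg h, List.map_cons, pvPrune, PySem.Set.update, List.foldl_cons]
      rw [ih (PySem.Set.add S (pvKey s, pvId s)) _]
      rfl

-- the rescan loop of B, characterised: the group's distinct ids minus the snake's own id
theorem pv_out_char (snakes : List (List (String × String))) (k id : String) :
    pvOut snakes k id
      = (PySem.List.dedup ((snakes.filter (fun t => pvKey t == k)).map pvId)).filter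
          (fun x => x != id) := by
  unfold pvOut
  have h1 : snakes.foldl (fun out t =>
      if pvKey t == k && pvId t != id && !(out.contains (pvId t)) then out ++ [pvId t]
      else out) []
      = snakes.foldl (fun out t =>
          if pvKey t == k && pvId t != id then PySem.Set.add out (pvId t) else out) [] := by
    apply PySem.List.foldl_congr_mem
    intro acc t _
    by_cases hc : pvKey t == k && pvId t != id
    · by_cases hm : acc.contains (pvId t) <;>
        simp [hc, PySem.Set.add, PySem.Set.contains]
    · simp [hc]
  rw [h1, PySem.List.foldl_if_eq_foldl_filter, ← List.foldl_map]
  have h2 : ((snakes.filter (fun t => pvKey t == k && pvId t != id)).map pvId).foldl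
      PySem.Set.add [] = PySem.List.dedup
        ((snakes.filter (fun t => pvKey t == k && pvId t != id)).map pvId) := by
    rw [PySem.List.dedup_eq_ofList, PySem.Set.ofList_eq_foldl]
  rw [h2]
  have h3 : snakes.filter (fun t => pvKey t == k && pvId t != id)
      = (snakes.filter (fun t => pvKey t == k)).filter (fun t => pvId t != id) := by
    rw [List.filter_filter]
    apply List.filter_congr
    intro t _
    rw [Bool.and_comm]
  rw [h3, pv_map_filter pvId (fun x => x != id), pv_dedup_filter]

-- B's per-group fold = A's collapsed per-group fold, for a nodup id list
theorem pv_group_eq (ids : List String) (hnd : ids.Nodup)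
    (acc : PySem.Dict String (List String)) :
    ids.foldl (fun d i =>
        if ids.filter (fun x => x != i) ≠ [] then
          d.insert i (d.getD i [] ++ ids.filter (fun x => x != i))
        else d) acc
      = (if 1 < ids.length then
          ids.foldl (fun p id1 =>
            p.insert id1 (p.getD id1 [] ++ ids.filter (fun id2 => id2 ≠ id1))) acc
        else acc) := by
  by_cases hlen : 1 < ids.length
  · rw [if_pos hlen]
    apply PySem.List.foldl_congr_mem
    intro d i hi
    have hex : ∃ b ∈ ids, b ≠ i := by
      rcases ids with _ | ⟨a, _ | ⟨b, r⟩⟩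
      · simp at hlen
      · simp at hlen
      · by_cases hia : i = a
        · refine ⟨b, by simp, ?_⟩
          have := (List.nodup_cons.mp hnd).1
          simp at this
          exact fun hbi => this.1 ((hbi.trans hia).symm)
        · exact ⟨a, by simp, fun hai => hia (by rw [hai])⟩
      
    rcases hex with ⟨b, hb, hbi⟩
    have hmem : b ∈ ids.filter (fun x => x != i) :=
      List.mem_filter.mpr ⟨hb, by simp [hbi]⟩
    rw [if_pos (List.ne_nil_of_mem hmem)]
    congr 2
    apply List.filter_congr
    intro x _
    by_cases hx : x = i <;> simp [hx, bne]
  · rw [if_neg hlen]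
    rcases ids with _ | ⟨a, _ | ⟨b, r⟩⟩
    · simp
    · rw [List.foldl_cons, List.foldl_nil]
      rw [if_neg (by simp)]
    · exfalso; simp at hlen

-- folding over a flatMap is the nested fold
theorem pv_foldl_flatMap {α β γ : Type} (g : α → List β) (f : γ → β → γ) (l : List α) :
    ∀ (i : γ), (l.flatMap g).foldl f i = l.foldl (fun b k => (g k).foldl f b) i := by
  induction l with
  | nil => intro i; rfl
  | cons a t ih =>
    intro i
    rw [List.flatMap_cons, List.foldl_append, List.foldl_cons, ih]

-- ===== VERDICT (by name: the statement is the Claim_ definition above) =====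
theorem buildPartnerDict_spec : Claim_equal_buildPartnerDict := by
  intro snakes _ _
  unfold Spec_buildPartnerDict buildPartnerDict buildPartnerDict_alt
  simp only []
  congr 1
  rw [pv_bfold, pv_prune_empty,
    pv_dedup_pairs_aux pvKey pvId (PySem.List.sorted snakes pvKey).length _ le_rfl
      (PySem.List.sorted_pairwise snakes pvKey),
    pv_foldl_flatMap,
    pv_groupby_char pvKey _ (PySem.List.sorted_pairwise snakes pvKey),
    List.foldl_map]
  apply PySem.List.foldl_congr_mem
  intro acc k hk
  simp only [List.foldl_map, pvG, pv_out_char, ← pv_sorted_filter_key pvKey k snakes,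
    ← PySem.List.dedup_eq_ofList]
  rw [pv_group_step _ (PySem.List.nodup_dedup _) acc,
    pv_group_eq _ (PySem.List.nodup_dedup _) acc]
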